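-- pv_equiv track=rewrite | github.com/EmmaSampietro/Bridging-Medical-Deserts | src/common/geo.py | normalize_region_name
-- ===== SOURCE A (Python) =====
-- def normalize_region_name(value: str | None) -> str:
--     """Normalize names for consistent region joins."""
--
--     if not value:
--         return ""
--     clean = (
--         str(value)
--         .strip()
--         .replace(".", "")
--         .replace("-", " ")
--         .replace("_", " ")
--         .lower()
--     )
--     return " ".join(part for part in clean.split() if part)
-- ===== SOURCE B (Python) =====
-- def normalize_region_name(value):
--     """Normalize names for consistent region joins (single-pass scan)."""
--     if not value:
--         return ""
--     tokens = []
--     cur = []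
--     for c in str(value):
--         if c == ".":
--             continue
--         if c == "-" or c == "_" or c.isspace():
--             if cur:
--                 tokens.append("".join(cur))
--                 cur = []
--         else:
--             cur.append(c.lower())
--     if cur:
--         tokens.append("".join(cur))
--     return " ".join(tokens)
-- ===== Notes on version B (the rewrite author's own statement) =====
-- stated objective: alternative
-- what changed: Replaced A's chain of whole-string passes (strip, three replaces, lower, split, join) by a single left-to-right character scan that builds the token list and current-token buffer in one traversal.
import Mathlib
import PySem

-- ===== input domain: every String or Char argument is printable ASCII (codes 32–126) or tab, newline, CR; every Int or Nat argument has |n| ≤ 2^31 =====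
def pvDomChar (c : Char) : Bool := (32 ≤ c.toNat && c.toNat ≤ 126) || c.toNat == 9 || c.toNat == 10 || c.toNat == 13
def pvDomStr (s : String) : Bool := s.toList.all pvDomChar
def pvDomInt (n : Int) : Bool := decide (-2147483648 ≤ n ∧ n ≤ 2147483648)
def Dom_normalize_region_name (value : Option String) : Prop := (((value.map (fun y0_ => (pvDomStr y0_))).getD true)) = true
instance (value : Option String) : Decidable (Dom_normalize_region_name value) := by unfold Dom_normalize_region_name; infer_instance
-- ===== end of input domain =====

-- B replaces A's chained strip/replace/lower/split whole-string passes by a single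
-- character scan that builds the tokens in one traversal (objective: alternative).

-- ===== PORT A =====
def normalize_region_name (value : Option String) : String :=
  match value with
  | none => ""
  | some s =>
    if s == "" then ""
    else
      let clean := PySem.Str.lower
        (PySem.Str.replace (PySem.Str.replace (PySem.Str.replace (PySem.Str.strip s) "." "") "-" " ") "_" " ")
      PySem.Str.join " " ((PySem.Str.split₀ clean).filter (fun part => part != ""))

-- ===== PORT B =====
-- the for-loop of Source B: state = (tokens so far, current token buffer)
def pvBLoop : List Char → List (List Char) → List Char → List (List Char) × List Char
  | [], tokens, cur => (tokens, cur)
  | c :: rest, tokens, cur =>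
    if c = '.' then pvBLoop rest tokens cur
    else if c = '-' ∨ c = '_' ∨ PySem.Chars.isspace c then
      if cur.isEmpty then pvBLoop rest tokens cur else pvBLoop rest (tokens ++ [cur]) []
    else pvBLoop rest tokens (cur ++ [PySem.Chars.lowerChar c])

def normalize_region_name_alt (value : Option String) : String :=
  match value with
  | none => ""
  | some s =>
    if s == "" then ""
    else
      let p := pvBLoop s.toList [] []
      let tokens := if p.2.isEmpty then p.1 else p.1 ++ [p.2]
      PySem.Str.join " " (tokens.map String.ofList)

-- ===== PRECONDITION & SPEC =====
def Spec_normalize_region_name (value : Option String) (out : String) : Prop := out = normalize_region_name_alt value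
instance (value : Option String) (out : String) : Decidable (Spec_normalize_region_name value out) := by unfold Spec_normalize_region_name; infer_instance

-- ===== CLAIM (what is proved, stated in full; the proofs are below) =====
def Claim_equal_normalize_region_name : Prop := ∀ (value : Option String), Dom_normalize_region_name value → Spec_normalize_region_name value (normalize_region_name value)

-- ===== LEMMAS AND PROOFS =====

-- the combined per-character transform performed by A's replace/lower passes
def pvF (c : Char) : Char := if c = '-' ∨ c = '_' then ' ' else PySem.Chars.lowerChar c

-- the transformed character list both sides effectively split
def pvT (l : List Char) : List Char := (l.filter (fun c => !(c == '.'))).map pvF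

lemma pvF_comp (c : Char) :
    PySem.Chars.lowerChar (if (if c = '-' then ' ' else c) = '_' then ' ' else if c = '-' then ' ' else c)
      = pvF c := by
  by_cases h1 : c = '-'
  · subst h1; decide
  by_cases h2 : c = '_'
  · subst h2; decide
  · simp [pvF, h1, h2]

lemma isspace_lowerChar (c : Char) :
    PySem.Chars.isspace (PySem.Chars.lowerChar c) = PySem.Chars.isspace c := by
  unfold PySem.Chars.lowerChar
  split_ifs with h
  · have hu : 65 ≤ c.toNat ∧ c.toNat ≤ 90 := by
      simp only [PySem.Chars.isupper, Bool.and_eq_true, decide_eq_true_eq, Char.le_def] at h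
      exact ⟨h.1, h.2⟩
    have hv : (c.toNat + 32).isValidChar := Or.inl (by omega)
    have ht : (Char.ofNat (c.toNat + 32)).toNat = c.toNat + 32 := by
      rw [Char.toNat_ofNat, if_pos hv]
    have h1 : PySem.Chars.isspace (Char.ofNat (c.toNat + 32)) = false := by
      simp only [PySem.Chars.isspace, ht]
      simp only [Bool.or_eq_false_iff, Bool.and_eq_false_iff, decide_eq_false_iff_not]
      omega
    have h2 : PySem.Chars.isspace c = false := by
      simp only [PySem.Chars.isspace]
      simp only [Bool.or_eq_false_iff, Bool.and_eq_false_iff, decide_eq_false_iff_not]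
      omega
    rw [h1, h2]
  · rfl

lemma isspace_pvF (c : Char) :
    PySem.Chars.isspace (pvF c) = decide (c = '-' ∨ c = '_' ∨ PySem.Chars.isspace c = true) := by
  by_cases h1 : c = '-'
  · subst h1; decide
  by_cases h2 : c = '_'
  · subst h2; decide
  · simp [pvF, h1, h2, isspace_lowerChar]

lemma pvF_ws {c : Char} (h : PySem.Chars.isspace c = true) : pvF c = c := by
  have h1 : c ≠ '-' := fun e => absurd (e ▸ h) (by decide)
  have h2 : c ≠ '_' := fun e => absurd (e ▸ h) (by decide)
  have h3 : PySem.Chars.isupper c = false := by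
    by_contra hC
    have hC2 : PySem.Chars.isupper c = true := by simpa using hC
    have hu : 65 ≤ c.toNat ∧ c.toNat ≤ 90 := by
      simp only [PySem.Chars.isupper, Bool.and_eq_true, decide_eq_true_eq, Char.le_def] at hC2
      exact ⟨hC2.1, hC2.2⟩
    simp only [PySem.Chars.isspace, Bool.or_eq_true, Bool.and_eq_true, decide_eq_true_eq] at h
    omega
  simp [pvF, h1, h2, PySem.Chars.lowerChar, h3]

lemma ws_ne_dot {c : Char} (h : PySem.Chars.isspace c = true) : c ≠ '.' :=
  fun e => absurd (e ▸ h) (by decide)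

-- ---- replace with a single-character pattern ----
lemma replaceGo_single (o : Char) (new : List Char) :
    ∀ (l : List Char) (fuel : Nat) (acc : List Char), l.length ≤ fuel →
      PySem.Chars.replace.go [o] new fuel l acc
        = acc.reverse ++ l.flatMap (fun c => if c = o then new else [c]) := by
  intro l
  induction l with
  | nil =>
    intro fuel acc _
    cases fuel <;> simp [PySem.Chars.replace.go]
  | cons c t ih =>
    intro fuel acc hf
    cases fuel with
    | zero => simp at hf
    | succ fuel =>
      have hf' : t.length ≤ fuel := by simpa using hf
      by_cases h : c = o
      · have hpre : [o].isPrefixOf (c :: t) = true := by simp [List.isPrefixOf, h]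
        simp only [PySem.Chars.replace.go, hpre, if_pos, List.length_cons, List.length_nil,
          List.drop_succ_cons, List.drop_zero]
        rw [ih fuel (new.reverse ++ acc) hf']
        simp [h]
      · have hpre : [o].isPrefixOf (c :: t) = false := by
          simp only [List.isPrefixOf, Bool.and_true]
          exact beq_eq_false_iff_ne.mpr (fun e => h e.symm)
        simp only [PySem.Chars.replace.go, hpre, Bool.false_eq_true, if_false]
        rw [ih fuel (c :: acc) hf']
        simp [h]

lemma replace_single (l : List Char) (o : Char) (new : List Char) :
    PySem.Chars.replace l [o] new = l.flatMap (fun c => if c = o then new else [c]) := by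
  unfold PySem.Chars.replace
  simp [replaceGo_single o new l l.length [] (le_refl _)]

lemma replace_dot (l : List Char) :
    PySem.Chars.replace l ['.'] [] = l.filter (fun c => !(c == '.')) := by
  rw [replace_single]
  induction l with
  | nil => rfl
  | cons c t ih => by_cases h : c = '.' <;> simp [h, ih]

lemma replace_map (l : List Char) (o d : Char) :
    PySem.Chars.replace l [o] [d] = l.map (fun c => if c = o then d else c) := by
  rw [replace_single]
  induction l with
  | nil => rfl
  | cons c t ih => by_cases h : c = o <;> simp [h, ih]

-- ---- split₀ ignores leading/trailing whitespace ----
lemma go_ws_only : ∀ (w : List Char), (∀ c ∈ w, PySem.Chars.isspace c = true) →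
    ∀ (cur : List Char) (acc : List (List Char)),
      PySem.Chars.split₀.go w cur acc = PySem.Chars.split₀.go [] cur acc := by
  intro w
  induction w with
  | nil => intro _ _ _; rfl
  | cons c t ih =>
    intro h cur acc
    have hc : PySem.Chars.isspace c = true := h c (by simp)
    have ht : ∀ c ∈ t, PySem.Chars.isspace c = true := fun c hm => h c (by simp [hm])
    by_cases hcur : cur.isEmpty
    · simp only [PySem.Chars.split₀.go, hc, if_pos, hcur]
      rw [ih ht [] acc]
      have hc' : cur = [] := by simpa using hcur
      subst hc'
      rfl
    · simp only [PySem.Chars.split₀.go, hc, if_pos, hcur, Bool.false_eq_true, if_false]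
      rw [ih ht [] (cur.reverse :: acc)]
      simp [PySem.Chars.split₀.go]

lemma go_trailing_ws (w : List Char) (hw : ∀ c ∈ w, PySem.Chars.isspace c = true) :
    ∀ (m cur : List Char) (acc : List (List Char)),
      PySem.Chars.split₀.go (m ++ w) cur acc = PySem.Chars.split₀.go m cur acc := by
  intro m
  induction m with
  | nil => intro cur acc; simpa using go_ws_only w hw cur acc
  | cons c t ih =>
    intro cur acc
    by_cases hc : PySem.Chars.isspace c
    · by_cases hcur : cur.isEmpty <;> simp [PySem.Chars.split₀.go, hc, hcur, ih]
    · simp [PySem.Chars.split₀.go, hc, ih]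

lemma go_leading_ws (w : List Char) (hw : ∀ c ∈ w, PySem.Chars.isspace c = true) :
    ∀ (m : List Char) (acc : List (List Char)),
      PySem.Chars.split₀.go (w ++ m) [] acc = PySem.Chars.split₀.go m [] acc := by
  induction w with
  | nil => intro m acc; rfl
  | cons c t ih =>
    intro m acc
    have hc : PySem.Chars.isspace c = true := hw c (by simp)
    have ht : ∀ c ∈ t, PySem.Chars.isspace c = true := fun c hm => hw c (by simp [hm])
    simp [PySem.Chars.split₀.go, hc, ih ht]

lemma strip_decomp (l : List Char) :
    ∃ w1 w2 : List Char, (∀ c ∈ w1, PySem.Chars.isspace c = true) ∧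
      (∀ c ∈ w2, PySem.Chars.isspace c = true) ∧ l = w1 ++ PySem.Chars.strip l ++ w2 := by
  refine ⟨List.takeWhile PySem.Chars.isspace l,
    (List.takeWhile PySem.Chars.isspace (List.dropWhile PySem.Chars.isspace l).reverse).reverse,
    fun c hc => List.mem_takeWhile_imp hc,
    fun c hc => List.mem_takeWhile_imp (by simpa using hc), ?_⟩
  unfold PySem.Chars.strip PySem.Chars.rstrip PySem.Chars.lstrip
  conv_lhs => rw [← List.takeWhile_append_dropWhile (p := PySem.Chars.isspace) (l := l)]
  rw [List.append_assoc]
  congr 1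
  conv_lhs => rw [← List.reverse_reverse (List.dropWhile PySem.Chars.isspace l),
    ← List.takeWhile_append_dropWhile (p := PySem.Chars.isspace)
       (l := (List.dropWhile PySem.Chars.isspace l).reverse)]
  rw [List.reverse_append]

lemma pvT_ws (w : List Char) (hw : ∀ c ∈ w, PySem.Chars.isspace c = true) : pvT w = w := by
  unfold pvT
  rw [List.filter_eq_self.mpr (fun c hc => by simp [ws_ne_dot (hw c hc)])]
  rw [List.map_congr_left (fun c hc => pvF_ws (hw c hc)), List.map_id']

lemma split_strip (l : List Char) :
    PySem.Chars.split₀ (pvT (PySem.Chars.strip l)) = PySem.Chars.split₀ (pvT l) := by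
  obtain ⟨w1, w2, h1, h2, hdec⟩ := strip_decomp l
  conv_rhs => rw [hdec]
  have e : pvT (w1 ++ PySem.Chars.strip l ++ w2)
      = pvT w1 ++ pvT (PySem.Chars.strip l) ++ pvT w2 := by
    simp [pvT, List.filter_append]
  rw [e, pvT_ws w1 h1, pvT_ws w2 h2]
  unfold PySem.Chars.split₀
  rw [List.append_assoc, go_leading_ws w1 h1, go_trailing_ws w2 h2]

-- ---- split₀ produces no empty parts ----
lemma go_ne_nil : ∀ (l cur : List Char) (acc : List (List Char)),
    (∀ x ∈ acc, x ≠ []) → ∀ x ∈ PySem.Chars.split₀.go l cur acc, x ≠ [] := by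
  intro l
  induction l with
  | nil =>
    intro cur acc hacc x hx
    by_cases hcur : cur.isEmpty
    · simp only [PySem.Chars.split₀.go, hcur, if_true, List.mem_reverse] at hx
      exact hacc x hx
    · have hcne : cur ≠ [] := by simpa using hcur
      simp only [PySem.Chars.split₀.go, hcur, Bool.false_eq_true, if_false, List.mem_reverse,
        List.mem_cons] at hx
      rcases hx with h | h
      · subst h; simpa using hcne
      · exact hacc x h
  | cons c t ih =>
    intro cur acc hacc x hx
    by_cases hc : PySem.Chars.isspace c
    · by_cases hcur : cur.isEmpty
      · simp only [PySem.Chars.split₀.go, hc, if_true, hcur] at hx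
        exact ih [] acc hacc x hx
      · have hcne : cur ≠ [] := by simpa using hcur
        simp only [PySem.Chars.split₀.go, hc, if_true, hcur, Bool.false_eq_true, if_false] at hx
        refine ih [] (cur.reverse :: acc) ?_ x hx
        intro y hy
        rcases List.mem_cons.mp hy with h | h
        · subst h; simpa using hcne
        · exact hacc y h
    · simp only [PySem.Chars.split₀.go, hc, Bool.false_eq_true, if_false] at hx
      exact ih (c :: cur) acc hacc x hx

-- ---- B's loop computes split₀ of the transformed list ----
lemma bloop_go : ∀ (l : List Char) (tokens : List (List Char)) (cur : List Char),
    PySem.Chars.split₀.go (pvT l) cur.reverse tokens.reverse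
      = (if (pvBLoop l tokens cur).2.isEmpty then (pvBLoop l tokens cur).1
         else (pvBLoop l tokens cur).1 ++ [(pvBLoop l tokens cur).2]) := by
  intro l
  induction l with
  | nil =>
    intro tokens cur
    by_cases hcur : cur.isEmpty
    · simp [pvT, PySem.Chars.split₀.go, pvBLoop, hcur]
    · simp [pvT, PySem.Chars.split₀.go, pvBLoop, hcur]
  | cons c t ih =>
    intro tokens cur
    by_cases hdot : c = '.'
    · have hTd : pvT (c :: t) = pvT t := by simp [pvT, hdot]
      have hB : pvBLoop (c :: t) tokens cur = pvBLoop t tokens cur := by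
        simp only [pvBLoop, hdot, if_true]
      rw [hTd, hB]
      exact ih tokens cur
    · have hTc : pvT (c :: t) = pvF c :: pvT t := by simp [pvT, hdot]
      rw [hTc]
      by_cases hsep : c = '-' ∨ c = '_' ∨ PySem.Chars.isspace c = true
      · have hsp : PySem.Chars.isspace (pvF c) = true := by
          rw [isspace_pvF]; exact decide_eq_true hsep
        have hB : pvBLoop (c :: t) tokens cur
            = if cur.isEmpty then pvBLoop t tokens cur else pvBLoop t (tokens ++ [cur]) [] := by
          simp only [pvBLoop, hdot, if_false, hsep, if_true]
        by_cases hcur : cur.isEmpty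
        · have hc0 : cur = [] := by simpa using hcur
          subst hc0
          rw [hB]
          simp only [List.isEmpty_nil, if_true, List.reverse_nil]
          simp only [PySem.Chars.split₀.go, hsp, if_true, List.isEmpty_nil]
          have h0 := ih tokens []
          simpa using h0
        · rw [hB, if_neg hcur]
          simp only [PySem.Chars.split₀.go, hsp, if_true]
          rw [if_neg (by simpa using hcur)]
          have h' := ih (tokens ++ [cur]) []
          simp only [List.reverse_nil, List.reverse_append, List.reverse_cons,
            List.nil_append, List.singleton_append] at h'
          simpa using h'
      · have hsp : PySem.Chars.isspace (pvF c) = false := by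
          rw [isspace_pvF]; exact decide_eq_false hsep
        have hF : pvF c = PySem.Chars.lowerChar c := by
          unfold pvF
          rw [if_neg (by tauto)]
        have hsp2 : PySem.Chars.isspace (PySem.Chars.lowerChar c) = false := by
          rw [← hF]; exact hsp
        have hB : pvBLoop (c :: t) tokens cur
            = pvBLoop t tokens (cur ++ [PySem.Chars.lowerChar c]) := by
          simp only [pvBLoop, hdot, if_false, hsep]
        rw [hB, hF]
        simp only [PySem.Chars.split₀.go, hsp2, Bool.false_eq_true, if_false]
        have h' := ih tokens (cur ++ [PySem.Chars.lowerChar c])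
        simp only [List.reverse_append, List.reverse_cons, List.reverse_nil, List.nil_append,
          List.singleton_append] at h'
        simpa using h'

-- ---- assembly ----
lemma main_eq (s : String) :
    normalize_region_name (some s) = normalize_region_name_alt (some s) := by
  by_cases hs : s == ""
  · simp [normalize_region_name, normalize_region_name_alt, hs]
  · simp only [normalize_region_name, normalize_region_name_alt, hs, Bool.false_eq_true, if_false]
    have hid : (String.toList ∘ String.ofList) = (id : List Char → List Char) := by
      funext x; simp
    have hspc : (" " : String).toList = [' '] := by decide
    have hclean :
        (PySem.Str.lower
          (PySem.Str.replace (PySem.Str.replace (PySem.Str.replace (PySem.Str.strip s) "." "") "-" " ") "_" " ")).toList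
          = pvT (PySem.Chars.strip s.toList) := by
      simp only [PySem.Str.toList_lower, PySem.Str.toList_replace, PySem.Str.toList_strip]
      rw [show ("." : String).toList = ['.'] by decide,
        show ("" : String).toList = [] by decide, hspc,
        show ("-" : String).toList = ['-'] by decide,
        show ("_" : String).toList = ['_'] by decide]
      rw [replace_dot, replace_map, replace_map]
      unfold PySem.Chars.lower pvT
      rw [List.map_map, List.map_map]
      exact List.map_congr_left (fun c _ => pvF_comp c)
    have hnonempty : ∀ x ∈ PySem.Chars.split₀ (pvT s.toList), x ≠ [] := by
      intro x hx
      exact go_ne_nil _ [] [] (by simp) x hx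
    have hA :
        PySem.Str.join " " ((PySem.Str.split₀ (PySem.Str.lower
          (PySem.Str.replace (PySem.Str.replace (PySem.Str.replace (PySem.Str.strip s) "." "") "-" " ") "_" " "))).filter
            (fun part => part != ""))
          = String.ofList (PySem.Chars.join [' '] (PySem.Chars.split₀ (pvT s.toList))) := by
      unfold PySem.Str.split₀ PySem.Str.join
      rw [hclean, split_strip]
      rw [List.filter_eq_self.mpr (by
        intro a ha
        simp only [List.mem_map] at ha
        obtain ⟨x, hx, rfl⟩ := ha
        have hxne := hnonempty x hx
        simp only [bne_iff_ne, ne_eq]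
        intro hcon
        apply hxne
        have : (String.ofList x).toList = ("" : String).toList := by rw [hcon]
        simpa using this)]
      rw [List.map_map, hid, List.map_id, hspc]
    rw [hA]
    have hb := bloop_go s.toList [] []
    simp only [List.reverse_nil] at hb
    show String.ofList (PySem.Chars.join [' '] (PySem.Chars.split₀ (pvT s.toList)))
        = PySem.Str.join " "
            ((if (pvBLoop s.toList [] []).2.isEmpty then (pvBLoop s.toList [] []).1
              else (pvBLoop s.toList [] []).1 ++ [(pvBLoop s.toList [] []).2]).map String.ofList)
    unfold PySem.Str.join
    rw [List.map_map, hid, List.map_id, hspc]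
    unfold PySem.Chars.split₀
    rw [hb]

-- ===== VERDICT (by name: the statement is the Claim_ definition above) =====
theorem normalize_region_name_spec : Claim_equal_normalize_region_name := by
  intro value _
  unfold Spec_normalize_region_name
  cases value with
  | none => rfl
  | some s => exact main_eq s
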